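-- pv_equiv track=rewrite | github.com/diciurcio-d/trmnl_event_guide | Whats_Happening_NYC/venue_scout/event_fetcher.py | _dedupe_llm_events
-- ===== SOURCE A (Python) =====
-- def _dedupe_llm_events(events: list[dict]) -> list[dict]:
--     """Deduplicate LLM extracted events by normalized name/date/url."""
--     best: dict[tuple[str, str, str], dict] = {}
--     for event in events:
--         key = (
--             str(event.get("name", "")).strip().lower(),
--             str(event.get("date_str", "")).strip(),
--             str(event.get("url", "")).strip().lower(),
--         )
--         existing = best.get(key)
--         if existing is None:
--             best[key] = event
--             continue
--         current_desc = str(event.get("description", "") or "")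
--         existing_desc = str(existing.get("description", "") or "")
--         if len(current_desc) > len(existing_desc):
--             best[key] = event
--     return list(best.values())
-- ===== SOURCE B (Python) =====
-- def _dedupe_llm_events(events: list[dict]) -> list[dict]:
--     """Deduplicate LLM extracted events by normalized name/date/url.
--
--     Two-pass: group all events by normalized key first, then pick the
--     event with the longest description from each group (max keeps the
--     first maximal element, matching keep-first-on-tie)."""
--     groups: dict[tuple[str, str, str], list[dict]] = {}
--     for event in events:
--         key = (
--             str(event.get("name", "")).strip().lower(),
--             str(event.get("date_str", "")).strip(),
--             str(event.get("url", "")).strip().lower(),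
--         )
--         groups.setdefault(key, []).append(event)
--     return [
--         max(group, key=lambda e: len(str(e.get("description", "") or "")))
--         for group in groups.values()
--     ]
-- ===== Notes on version B (the rewrite author's own statement) =====
-- stated objective: alternative
-- what changed: Replaces A's single streaming pass that keeps one current-best event per key behind an inline length comparison by a two-phase group-then-reduce: first build a dict mapping each normalized key to the list of all its events, then take max by description length (first maximal) from each group.
import Mathlib
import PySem

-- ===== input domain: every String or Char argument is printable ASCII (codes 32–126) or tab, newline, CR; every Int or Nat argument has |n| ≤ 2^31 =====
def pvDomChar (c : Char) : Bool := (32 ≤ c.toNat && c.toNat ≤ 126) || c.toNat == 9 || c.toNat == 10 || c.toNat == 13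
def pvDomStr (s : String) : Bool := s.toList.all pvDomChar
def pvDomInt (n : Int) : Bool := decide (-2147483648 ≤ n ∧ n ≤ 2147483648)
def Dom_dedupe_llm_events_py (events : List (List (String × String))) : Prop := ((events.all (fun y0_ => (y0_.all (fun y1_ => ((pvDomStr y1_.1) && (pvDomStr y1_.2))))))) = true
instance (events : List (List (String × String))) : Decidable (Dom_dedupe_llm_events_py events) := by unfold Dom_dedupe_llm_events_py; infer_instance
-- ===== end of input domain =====

-- B replaces A's streaming keep-best-per-key pass by a two-phase group-then-reduce (grouping dict, then first-max by description length per group); alternative decomposition, same cost.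


-- ===== PORT A =====
-- the normalized (name, date_str, url) key; both Python versions compute it with the same expression
def pvKeyOf (event : List (String × String)) : String × String × String :=
  (PySem.Str.lower (PySem.Str.strip ((PySem.Dict.mk event).getD "name" "")),
   PySem.Str.strip ((PySem.Dict.mk event).getD "date_str" ""),
   PySem.Str.lower (PySem.Str.strip ((PySem.Dict.mk event).getD "url" "")))

-- len(str(e.get("description", "") or "")) — the values are strings here, so str(· or "") is the identity
def pvDescLen (event : List (String × String)) : Int :=
  PySem.Str.len ((PySem.Dict.mk event).getD "description" "")

def dedupe_llm_events_py (events : List (List (String × String))) : List (List (String × String)) :=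
  (events.foldl (fun best event =>
      match best.get? (pvKeyOf event) with
      | none => best.insert (pvKeyOf event) event
      | some existing =>
          if pvDescLen event > pvDescLen existing then best.insert (pvKeyOf event) event
          else best)
    PySem.Dict.empty).values

-- ===== PORT B =====
-- groups.setdefault(key, []).append(event) ported as modify key [] (· ++ [event]) (exact: same resulting items)
def dedupe_llm_events_py_alt (events : List (List (String × String))) : List (List (String × String)) :=
  let groups := events.foldl (fun g event => g.modify (pvKeyOf event) [] (· ++ [event]))
    (PySem.Dict.empty : PySem.Dict (String × String × String) (List (List (String × String))))
  groups.values.filterMap (fun group => PySem.List.max? group (fun e => pvDescLen e))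

-- ===== PRECONDITION & SPEC =====
def Spec_dedupe_llm_events_py (events : List (List (String × String))) (out : List (List (String × String))) : Prop := out = dedupe_llm_events_py_alt events
instance (events : List (List (String × String))) (out : List (List (String × String))) : Decidable (Spec_dedupe_llm_events_py events out) := by unfold Spec_dedupe_llm_events_py; infer_instance

-- ===== CLAIM (what is proved, stated in full; the proofs are below) =====
def Claim_equal_dedupe_llm_events_py : Prop := ∀ (events : List (List (String × String))), Dom_dedupe_llm_events_py events → Spec_dedupe_llm_events_py events (dedupe_llm_events_py events)

-- ===== LEMMAS AND PROOFS =====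

-- A's per-key update, written as a function of the previous best entry
def pvNew (d : PySem.Dict (String × String × String) (List (String × String)))
    (e : List (String × String)) : List (String × String) :=
  match d.get? (pvKeyOf e) with
  | none => e
  | some ex => if pvDescLen ex < pvDescLen e then e else ex

-- the running first-max step (= PySem.List.max?'s fold step at key pvDescLen)
def pvUpd (acc : Option (List (String × String))) (e : List (String × String)) :
    Option (List (String × String)) :=
  match acc with
  | none => some e
  | some m => if pvDescLen m < pvDescLen e then some e else some m

theorem pv_insert_get?_eq {κ ν : Type} [BEq κ] [LawfulBEq κ]
    (d : PySem.Dict κ ν) (k : κ) (ex : ν) (hnd : d.keys.Nodup)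
    (h : d.get? k = some ex) : d.insert k ex = d := by
  apply PySem.Dict.ext
  have hc : d.contains k = true := by
    rw [PySem.Dict.contains_eq_isSome_get?, h]; rfl
  rw [PySem.Dict.items_insert_of_contains d ex hc]
  conv_rhs => rw [← List.map_id d.items]
  apply List.map_congr_left
  intro p hp
  obtain ⟨p1, p2⟩ := p
  by_cases hk : (p1 == k) = true
  · have hk' : p1 = k := eq_of_beq hk
    have h2 : d.get? p1 = some p2 := PySem.Dict.get?_of_mem_items d hp hnd
    rw [hk', h] at h2
    have hex : p2 = ex := (Option.some.inj h2).symm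
    simp [hk', hex]
  · simp [hk]

theorem pv_fold_stepA_eq (events : List (List (String × String)))
    (d : PySem.Dict (String × String × String) (List (String × String))) (hnd : d.keys.Nodup) :
    events.foldl (fun best event =>
      match best.get? (pvKeyOf event) with
      | none => best.insert (pvKeyOf event) event
      | some existing =>
          if pvDescLen event > pvDescLen existing then best.insert (pvKeyOf event) event
          else best) d
    = events.foldl (fun d e => d.insert (pvKeyOf e) (pvNew d e)) d := by
  induction events generalizing d with
  | nil => rfl
  | cons e es ih =>
    simp only [List.foldl_cons]
    have hstep : (match d.get? (pvKeyOf e) with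
      | none => d.insert (pvKeyOf e) e
      | some existing =>
          if pvDescLen e > pvDescLen existing then d.insert (pvKeyOf e) e
          else d) = d.insert (pvKeyOf e) (pvNew d e) := by
      unfold pvNew
      cases hg : d.get? (pvKeyOf e) with
      | none => rfl
      | some ex =>
        simp only [gt_iff_lt]
        by_cases hlt : pvDescLen ex < pvDescLen e
        · simp [hlt]
        · simp only [hlt, if_false]
          exact (pv_insert_get?_eq d _ ex hnd hg).symm
    rw [hstep]
    exact ih _ (PySem.Dict.nodup_keys_insert d _ _ hnd)

theorem pv_A_get? (events : List (List (String × String)))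
    (d : PySem.Dict (String × String × String) (List (String × String)))
    (k : String × String × String) :
    (events.foldl (fun d e => d.insert (pvKeyOf e) (pvNew d e)) d).get? k
      = (events.filter (fun e => pvKeyOf e == k)).foldl pvUpd (d.get? k) := by
  induction events generalizing d with
  | nil => rfl
  | cons e es ih =>
    simp only [List.foldl_cons, List.filter_cons]
    rw [ih]
    by_cases hbe : (pvKeyOf e == k) = true
    · have hk : pvKeyOf e = k := eq_of_beq hbe
      rw [if_pos hbe]
      simp only [List.foldl_cons]
      have hstep : (d.insert (pvKeyOf e) (pvNew d e)).get? k = pvUpd (d.get? k) e := by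
        rw [PySem.Dict.get?_insert, if_pos hk.symm, ← hk]
        unfold pvNew pvUpd
        cases hg : d.get? (pvKeyOf e) with
        | none => rfl
        | some ex => exact apply_ite some _ _ _
      rw [hstep]
    · have hk : pvKeyOf e ≠ k := by simpa using hbe
      rw [if_neg hbe]
      have hstep : (d.insert (pvKeyOf e) (pvNew d e)).get? k = d.get? k := by
        rw [PySem.Dict.get?_insert, if_neg (Ne.symm hk)]
      rw [hstep]

theorem pv_max?_foldl (xs : List (List (String × String))) :
    PySem.List.max? xs (fun e => pvDescLen e) = xs.foldl pvUpd none := by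
  unfold PySem.List.max?
  congr 1
  funext acc e
  cases acc with
  | none => rfl
  | some m => by_cases h : pvDescLen m < pvDescLen e <;> simp [pvUpd, h]

theorem pv_B_getD (events : List (List (String × String))) (k : String × String × String) :
    (events.foldl (fun g event => g.modify (pvKeyOf event) [] (· ++ [event]))
        (PySem.Dict.empty : PySem.Dict (String × String × String) (List (List (String × String))))).getD k []
      = events.filter (fun e => pvKeyOf e == k) := by
  have h1 : events.foldl (fun g event => g.modify (pvKeyOf event) [] (· ++ [event]))
      (PySem.Dict.empty : PySem.Dict (String × String × String) (List (List (String × String))))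
      = (events.map (fun e => (pvKeyOf e, e))).foldl
          (fun g p => g.modify p.1 [] (· ++ [p.2])) PySem.Dict.empty := by
    rw [List.foldl_map]
  rw [h1, PySem.Dict.getD_foldl_modify_append, PySem.Dict.getD_empty, List.filter_map]
  simp [Function.comp_def]

theorem pv_mem_update {α : Type} [BEq α] [LawfulBEq α] (l : List α) (s : PySem.Set α) (k : α) :
    k ∈ PySem.Set.update s l ↔ k ∈ s ∨ k ∈ l := by
  induction l generalizing s with
  | nil => simp [PySem.Set.update]
  | cons x t ih =>
    show k ∈ PySem.Set.update (s.add x) t ↔ _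
    rw [ih]
    simp [PySem.Set.mem_add, List.mem_cons]
    tauto

theorem pv_filterMap_eq_map {κ α : Type} (ks : List κ) (g : κ → Option α) (dflt : α)
    (h : ∀ k ∈ ks, (g k).isSome) :
    ks.filterMap g = ks.map (fun k => (g k).getD dflt) := by
  induction ks with
  | nil => rfl
  | cons x t ih =>
    simp only [List.filterMap_cons, List.map_cons]
    cases hx : g x with
    | none => exact absurd (h x (by simp)) (by simp [hx])
    | some a => simp [ih (fun k hk => h k (by simp [hk]))]

-- ===== VERDICT (by name: the statement is the Claim_ definition above) =====
theorem dedupe_llm_events_py_spec : Claim_equal_dedupe_llm_events_py := by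
  intro events _
  show dedupe_llm_events_py events = dedupe_llm_events_py_alt events
  simp only [dedupe_llm_events_py, dedupe_llm_events_py_alt]
  rw [pv_fold_stepA_eq events _ PySem.Dict.nodup_keys_empty]
  set A := events.foldl (fun d e => d.insert (pvKeyOf e) (pvNew d e)) PySem.Dict.empty with hA
  set G := events.foldl (fun g event => g.modify (pvKeyOf event) [] (· ++ [event]))
    (PySem.Dict.empty : PySem.Dict (String × String × String) (List (List (String × String)))) with hG
  have hAnd : A.keys.Nodup :=
    PySem.Dict.nodup_keys_foldl_insert_key events pvKeyOf _ _ PySem.Dict.nodup_keys_empty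
  have hGnd : G.keys.Nodup :=
    PySem.Dict.nodup_keys_foldl_modify_key events pvKeyOf [] (fun _ e => (· ++ [e])) _
      PySem.Dict.nodup_keys_empty
  have hAkeys : A.keys = PySem.Set.update [] (events.map pvKeyOf) := by
    rw [hA, PySem.Dict.keys_foldl_insert_key events pvKeyOf (fun d e => pvNew d e),
      PySem.Dict.keys_empty]
  have hGkeys : G.keys = PySem.Set.update [] (events.map pvKeyOf) := by
    rw [hG, PySem.Dict.keys_foldl_modify_key events pvKeyOf [] (fun _ e => (· ++ [e])),
      PySem.Dict.keys_empty]
  have hval : ∀ k, A.getD k ([] : List (String × String))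
      = (PySem.List.max? (events.filter (fun e => pvKeyOf e == k)) (fun e => pvDescLen e)).getD [] := by
    intro k
    rw [PySem.Dict.getD_eq_get?_getD, hA, pv_A_get?, PySem.Dict.get?_empty, pv_max?_foldl]
  have hgrp : ∀ k, G.getD k ([] : List (List (String × String)))
      = events.filter (fun e => pvKeyOf e == k) := by
    intro k; rw [hG]; exact pv_B_getD events k
  rw [PySem.Dict.values_eq_map_keys A hAnd ([] : List (String × String)),
    PySem.Dict.values_eq_map_keys G hGnd ([] : List (List (String × String))),
    hAkeys, hGkeys, List.filterMap_map]
  have hsome : ∀ k ∈ PySem.Set.update ([] : PySem.Set (String × String × String)) (events.map pvKeyOf),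
      ((fun group => PySem.List.max? group (fun e => pvDescLen e)) ∘
        fun k => G.getD k ([] : List (List (String × String)))) k |>.isSome := by
    intro k hk
    have hmem : k ∈ events.map pvKeyOf := by
      rcases (pv_mem_update _ _ _).mp hk with h | h
      · simp at h
      · exact h
    obtain ⟨e, he, hke⟩ := List.mem_map.mp hmem
    have hne : events.filter (fun e => pvKeyOf e == k) ≠ [] :=
      List.ne_nil_of_mem (List.mem_filter.mpr ⟨he, by simp [hke]⟩)
    simp only [Function.comp_apply, hgrp]
    cases hm : PySem.List.max? (events.filter (fun e => pvKeyOf e == k)) (fun e => pvDescLen e) with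
    | none => exact absurd ((PySem.List.max?_eq_none_iff _ _).mp hm) hne
    | some m => rfl
  rw [pv_filterMap_eq_map _ _ ([] : List (String × String)) hsome]
  apply List.map_congr_left
  intro k hk
  simp only [Function.comp_apply, hval, hgrp]
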